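-- pv_equiv track=rewrite | github.com/applepc24/jungleAlg | 상금_헌터.py | p2018
-- ===== SOURCE A (Python) =====
-- def p2018(b):
--     if b == 0:
--         return 0
--     bound = [1, 3, 7, 15, 31]
--     money = [512, 256, 128, 64, 32]  # 만원 단위
--     for i in range(len(bound)):
--         if b <= bound[i]:
--             return money[i]
--     return 0
-- ===== SOURCE B (Python) =====
-- def p2018(b):
--     if b == 0:
--         return 0
--     if b <= 1:
--         return 512
--     if b > 31:
--         return 0
--     return 1024 >> b.bit_length()
-- ===== Notes on version B (the rewrite author's own statement) =====
-- stated objective: simpler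
-- what changed: Replaces the index-walking linear scan over the paired bound/money tables with a closed arithmetic form: the brackets are powers of two, so the prize is 1024 >> b.bit_length() inside 2..31, with the same b==0 guard and constant edges.
import Mathlib
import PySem

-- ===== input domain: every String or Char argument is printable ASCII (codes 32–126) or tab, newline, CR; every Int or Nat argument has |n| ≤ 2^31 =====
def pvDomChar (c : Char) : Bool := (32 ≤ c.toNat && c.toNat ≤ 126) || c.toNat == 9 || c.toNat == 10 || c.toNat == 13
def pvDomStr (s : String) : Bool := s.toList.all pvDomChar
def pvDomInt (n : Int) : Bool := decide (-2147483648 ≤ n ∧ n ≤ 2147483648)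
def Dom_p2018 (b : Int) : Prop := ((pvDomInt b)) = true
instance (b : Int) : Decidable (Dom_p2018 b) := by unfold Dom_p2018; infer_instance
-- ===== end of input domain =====

-- B replaces A's linear scan over paired threshold/prize tables by the closed form 1024 >> bit_length(b) (simpler; same values everywhere).

-- ===== PORT A =====
def p2018Bound : List Int := [1, 3, 7, 15, 31]
def p2018Money : List Int := [512, 256, 128, 64, 32]

-- the `for i in range(len(bound))` loop with early return, as recursion over the index list
def p2018Go (b : Int) : List Int → Int
  | [] => 0
  | i :: rest =>
    if b ≤ PySem.List.pyGetD p2018Bound i 0 then PySem.List.pyGetD p2018Money i 0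
    else p2018Go b rest

def p2018 (b : Int) : Int :=
  if b = 0 then 0 else p2018Go b (PySem.List.pyRange 0 5 1)

-- ===== PORT B =====
-- Python's int.bit_length (on the positive ints B applies it to)
def p2018BitLen (n : Int) : Nat := if n = 0 then 0 else Nat.log2 n.natAbs + 1

def p2018_alt (b : Int) : Int :=
  if b = 0 then 0
  else if b ≤ 1 then 512
  else if b > 31 then 0
  else (1024 : Int) / 2 ^ (p2018BitLen b)   -- 1024 >> k on a nonnegative value

-- ===== PRECONDITION & SPEC =====
def Spec_p2018 (b : Int) (out : Int) : Prop := out = p2018_alt b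
instance (b : Int) (out : Int) : Decidable (Spec_p2018 b out) := by unfold Spec_p2018; infer_instance

-- ===== CLAIM (what is proved, stated in full; the proofs are below) =====
def Claim_equal_p2018 : Prop := ∀ (b : Int), Dom_p2018 b → Spec_p2018 b (p2018 b)

-- ===== LEMMAS AND PROOFS =====

-- ===== VERDICT (by name: the statement is the Claim_ definition above) =====
theorem p2018_spec : Claim_equal_p2018 := by
  intro b _
  unfold Spec_p2018 p2018 p2018_alt
  by_cases h0 : b = 0
  · simp [h0]
  · simp only [h0, if_false]
    by_cases h1 : b ≤ 1
    · have : (PySem.List.pyRange 0 5 1) = [0, 1, 2, 3, 4] := by decide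
      simp [this, p2018Go, p2018Bound, p2018Money, h1,
            PySem.List.pyGetD]
    · by_cases h2 : b > 31
      · have : (PySem.List.pyRange 0 5 1) = [0, 1, 2, 3, 4] := by decide
        simp only [h1, if_false, h2, if_true]
        simp [this, p2018Go, p2018Bound, p2018Money, PySem.List.pyGetD]
        omega
      · have hl : 2 ≤ b := by omega
        have hu : b ≤ 31 := by omega
        interval_cases b <;> decide
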